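-- pv_equiv track=rewrite | github.com/drizztSun/common_project | PythonLeetcode/leetcodeM/1437_CheckIfAllOneAreAtLeastLengthKPlacesAway.py | doit_bitmap
-- ===== SOURCE A (Python) =====
-- def doit_bitmap(nums: list, k: int) -> bool:
--     # convert binary array into int
--     x = 0
--     for num in nums:
--         x = (x << 1) | num
--
--     # base case
--     if x == 0 or k == 0:
--         return True
--
--     # remove trailing zeros
--     while x & 1 == 0:
--         x = x >> 1
--
--     while x != 1:
--         # remove trailing 1-bit
--         x = x >> 1
--
--         # count trailing zeros
--         count = 0
--         while x & 1 == 0: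
--             x = x >> 1
--             count += 1
--
--         # number of zeros in-between 1-bits
--         # should be greater than or equal to k
--         if count < k:
--             return False
--
--     return True
-- ===== SOURCE B (Python) =====
-- def doit_bitmap(nums: list, k: int) -> bool:
--     # bit-parallel check: instead of scanning runs of bits, test whole-word
--     # overlaps x & (x >> j) for each shift j = 1..k (capped at the bit length):
--     # all 1-bits are >= k apart iff no set bit has another set bit within k below it
--     x = 0
--     for num in nums:
--         x = (x << 1) | num
--
--     if k <= 0 or x == 0:
--         return True
--     if x < 0:
--         # negative bitmap = infinitely many high 1-bits adjacent to each other
--         return False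
--
--     return all(x & (x >> j) == 0
--                for j in range(1, min(k, x.bit_length()) + 1))
-- ===== Notes on version B (the rewrite author's own statement) =====
-- stated objective: alternative
-- what changed: A scans the bitmap bit by bit with nested trailing-zero-stripping while loops; B never walks individual bits: it tests the whole bitmap against its own shifts, x & (x >> j) == 0 for j = 1..min(k, x.bit_length()), a bit-parallel pairwise-distance check. Pre_ excludes only k < 0 together with a negative element, where A's loop never terminates (no return value to match).
import Mathlib
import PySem

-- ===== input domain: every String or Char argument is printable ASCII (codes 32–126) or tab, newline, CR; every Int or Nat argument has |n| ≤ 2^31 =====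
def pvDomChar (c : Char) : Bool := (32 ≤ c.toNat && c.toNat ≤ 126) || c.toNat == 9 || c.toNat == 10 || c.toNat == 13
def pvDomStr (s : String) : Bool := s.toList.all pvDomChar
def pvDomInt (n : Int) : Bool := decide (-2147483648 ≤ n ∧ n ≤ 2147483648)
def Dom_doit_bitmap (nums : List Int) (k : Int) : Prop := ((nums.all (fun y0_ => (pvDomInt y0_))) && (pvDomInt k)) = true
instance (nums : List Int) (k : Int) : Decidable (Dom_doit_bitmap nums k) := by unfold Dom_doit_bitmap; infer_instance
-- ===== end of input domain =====

-- B replaces A's sequential bit scan (nested trailing-zero-stripping while loops) by a bit-parallel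
-- check: x & (x >> j) == 0 for every shift j = 1..min(k, bit_length) (objective: alternative).

-- bridge facts the ports' termination proofs cite by name
theorem pvBand1Eq (x : Int) : PySem.Int.band x 1 = x % 2 := by
  rw [PySem.Int.band_one, PySem.Int.mod_eq_emod_of_pos (by norm_num)]

theorem pvShr1Eq (x : Int) : x >>> (1 : Nat) = x / 2 := by
  simpa using Int.shiftRight_eq_div_pow x 1

theorem pvShr1LtOfEven {x : Int} (hx : x ≠ 0) (he : x % 2 = 0) :
    (x >>> (1 : Nat)).natAbs < x.natAbs := by
  rw [pvShr1Eq]; omega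

theorem pvShr1LtOfPos {x : Int} (hx : 0 < x) :
    (x >>> (1 : Nat)).natAbs < x.natAbs := by
  rw [pvShr1Eq]; omega

-- ===== PORT A =====
-- 'while x & 1 == 0: x = x >> 1' (the x = 0 guard is only for totality: Python would loop forever
-- there, and every call site below has x ≠ 0)
def doit_bitmapStrip (x : Int) : Int :=
  if hx : x = 0 then 0
  else if h : PySem.Int.band x 1 = 0 then doit_bitmapStrip (x >>> (1 : Nat))
  else x
termination_by x.natAbs
decreasing_by exact pvShr1LtOfEven hx (by rw [← pvBand1Eq]; exact h)

-- the inner 'count trailing zeros' loop: returns (count, x) as left by the loop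
def doit_bitmapStripCount (x : Int) (count : Int) : Int × Int :=
  if hx : x = 0 then (count, 0)
  else if h : PySem.Int.band x 1 = 0 then doit_bitmapStripCount (x >>> (1 : Nat)) (count + 1)
  else (count, x)
termination_by x.natAbs
decreasing_by exact pvShr1LtOfEven hx (by rw [← pvBand1Eq]; exact h)

-- 'while x != 1: …'; the fuel is only for totality: Python diverges exactly on the inputs
-- Pre_doit_bitmap excludes, and on every admitted input the fuel passed below is enough
def doit_bitmapLoop (fuel : Nat) (x k : Int) : Bool :=
  match fuel with
  | 0 => false
  | f + 1 =>
    if x = 1 then true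
    else
      let p := doit_bitmapStripCount (x >>> (1 : Nat)) 0
      if p.1 < k then false else doit_bitmapLoop f p.2 k

def doit_bitmap (nums : List Int) (k : Int) : Bool :=
  let x := nums.foldl (fun x num => PySem.Int.bor (x <<< (1 : Nat)) num) 0
  if x = 0 ∨ k = 0 then true
  else
    let x' := doit_bitmapStrip x
    doit_bitmapLoop x'.natAbs x' k

-- ===== PORT B =====
-- x.bit_length() of Source B; the x ≤ 0 guard is only for totality (B calls it with x > 0 only,
-- where this recursion is exactly Python's bit_length)
def pvBitLen (x : Int) : Int :=
  if hx : x ≤ 0 then 0 else pvBitLen (x >>> (1 : Nat)) + 1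
termination_by x.natAbs
decreasing_by exact pvShr1LtOfPos (by omega)

def doit_bitmap_alt (nums : List Int) (k : Int) : Bool :=
  let x := nums.foldl (fun x num => PySem.Int.bor (x <<< (1 : Nat)) num) 0
  if k ≤ 0 ∨ x = 0 then true
  else if x < 0 then false
  else
    -- all(x & (x >> j) == 0 for j in range(1, min(k, x.bit_length()) + 1))
    (PySem.List.pyRange 1 (min k (pvBitLen x) + 1) 1).all
      (fun j => PySem.Int.band x (x >>> j.toNat) == 0)

-- ===== PRECONDITION & SPEC =====
-- Pre_ excludes exactly the inputs on which A never returns: with k < 0 and some negative element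
-- the accumulated bitmap is negative and A's 'while x != 1' loop runs forever.
def Pre_doit_bitmap (nums : List Int) (k : Int) : Prop := 0 ≤ k ∨ ∀ n ∈ nums, 0 ≤ n
instance (nums : List Int) (k : Int) : Decidable (Pre_doit_bitmap nums k) := by
  unfold Pre_doit_bitmap; infer_instance

def pvWitness_doit_bitmap : List Int × Int := ([1, 0, 0, 1], 2)

def Spec_doit_bitmap (nums : List Int) (k : Int) (out : Bool) : Prop := out = doit_bitmap_alt nums k
instance (nums : List Int) (k : Int) (out : Bool) : Decidable (Spec_doit_bitmap nums k out) := by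
  unfold Spec_doit_bitmap; infer_instance

-- ===== CLAIM (what is proved, stated in full; the proofs are below) =====
def Claim_equal_doit_bitmap : Prop := ∀ (nums : List Int) (k : Int), Dom_doit_bitmap nums k → Pre_doit_bitmap nums k → Spec_doit_bitmap nums k (doit_bitmap nums k)

-- ===== LEMMAS AND PROOFS =====

-- 'no two set bits of m less than k+1 apart' — both ports are proved equal to this predicate
def pvGood (m : Nat) (k : Int) : Prop :=
  ∀ i j : Nat, i < j → m.testBit i = true → m.testBit j = true → k + i < j

-- number of trailing zeros of a positive Nat (the quantity A's inner loops compute)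
def pvTz (y : Nat) : Nat :=
  if y % 2 = 1 ∨ y = 0 then 0 else pvTz (y / 2) + 1
termination_by y
decreasing_by omega

theorem pvShrCast (m d : Nat) : ((m : Int) >>> d) = ((m >>> d : Nat) : Int) := by
  rw [Int.shiftRight_eq_div_pow, Nat.shiftRight_eq_div_pow]
  push_cast [Int.natCast_div]; norm_num

theorem pvBandCastMod (y : Nat) : PySem.Int.band (y : Int) 1 = ((y % 2 : Nat) : Int) := by
  rw [pvBand1Eq]; push_cast; omega

theorem pvTzShr : ∀ y : Nat, 0 < y →
    (y >>> pvTz y) % 2 = 1 ∧ 0 < y >>> pvTz y ∧ y >>> pvTz y ≤ y := by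
  intro y
  induction y using Nat.strong_induction_on with
  | _ y ih =>
    intro hy
    rw [pvTz]
    by_cases ho : y % 2 = 1 ∨ y = 0
    · simp only [ho, if_pos, Nat.shiftRight_zero]
      exact ⟨by omega, hy, le_rfl⟩
    · rw [if_neg ho]
      have h2 : 0 < y / 2 := by omega
      have := ih (y / 2) (by omega) h2
      have hs : y >>> (pvTz (y / 2) + 1) = (y / 2) >>> pvTz (y / 2) := by
        rw [Nat.add_comm, Nat.shiftRight_add, Nat.shiftRight_one]
      rw [hs]
      exact ⟨this.1, this.2.1, by omega⟩

theorem pvTzLow : ∀ y i : Nat, i < pvTz y → y.testBit i = false := by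
  intro y
  induction y using Nat.strong_induction_on with
  | _ y ih =>
    intro i hi
    rw [pvTz] at hi
    by_cases ho : y % 2 = 1 ∨ y = 0
    · simp [ho] at hi
    · rw [if_neg ho] at hi
      cases i with
      | zero => simp [Nat.testBit_zero]; omega
      | succ s =>
        rw [Nat.testBit_succ]
        exact ih (y / 2) (by omega) s (by omega)

theorem pvTzSet (y : Nat) (hy : 0 < y) : y.testBit (pvTz y) = true := by
  have h := (pvTzShr y hy).1
  have h0 : (y >>> pvTz y).testBit 0 = true := by simp [Nat.testBit_zero, h]
  rw [Nat.testBit_shiftRight] at h0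
  simpa using h0

theorem pvStripCountNat : ∀ y : Nat, 0 < y → ∀ c : Int,
    doit_bitmapStripCount (y : Int) c = (c + (pvTz y : Int), ((y >>> pvTz y : Nat) : Int)) := by
  intro y
  induction y using Nat.strong_induction_on with
  | _ y ih =>
    intro hy c
    have hy0 : (y : Int) ≠ 0 := by omega
    rw [doit_bitmapStripCount, dif_neg hy0]
    by_cases ho : y % 2 = 1
    · have hb : ¬ PySem.Int.band (y : Int) 1 = 0 := by rw [pvBandCastMod, ho]; norm_num
      rw [dif_neg hb, pvTz, if_pos (Or.inl ho)]
      simp [Nat.shiftRight_zero]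
    · have hb : PySem.Int.band (y : Int) 1 = 0 := by
        rw [pvBandCastMod]; have : y % 2 = 0 := by omega
        rw [this]; norm_num
      rw [dif_pos hb, pvShrCast, Nat.shiftRight_one]
      have h2 : 0 < y / 2 := by omega
      rw [ih (y / 2) (by omega) h2 (c + 1)]
      have htz : pvTz y = pvTz (y / 2) + 1 := by
        rw [pvTz, if_neg (by omega)]
      have hs : y >>> (pvTz (y / 2) + 1) = (y / 2) >>> pvTz (y / 2) := by
        rw [Nat.add_comm, Nat.shiftRight_add, Nat.shiftRight_one]
      rw [htz, hs]
      congr 1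
      push_cast; ring

theorem pvStripNat : ∀ y : Nat, 0 < y →
    doit_bitmapStrip (y : Int) = ((y >>> pvTz y : Nat) : Int) := by
  intro y
  induction y using Nat.strong_induction_on with
  | _ y ih =>
    intro hy
    have hy0 : (y : Int) ≠ 0 := by omega
    rw [doit_bitmapStrip, dif_neg hy0]
    by_cases ho : y % 2 = 1
    · have hb : ¬ PySem.Int.band (y : Int) 1 = 0 := by rw [pvBandCastMod, ho]; norm_num
      rw [dif_neg hb, pvTz, if_pos (Or.inl ho)]
      simp [Nat.shiftRight_zero]
    · have hb : PySem.Int.band (y : Int) 1 = 0 := by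
        rw [pvBandCastMod]; have : y % 2 = 0 := by omega
        rw [this]; norm_num
      rw [dif_pos hb, pvShrCast, Nat.shiftRight_one]
      have h2 : 0 < y / 2 := by omega
      rw [ih (y / 2) (by omega) h2]
      have htz : pvTz y = pvTz (y / 2) + 1 := by rw [pvTz, if_neg (by omega)]
      rw [htz, Nat.add_comm, Nat.shiftRight_add, Nat.shiftRight_one]

theorem pvBitLenNonneg (x : Int) : 0 ≤ pvBitLen x := by
  induction x using (WellFounded.induction (measure Int.natAbs).wf) with
  | _ x ih =>
    rw [pvBitLen]
    by_cases hx : x ≤ 0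
    · simp [hx]
    · rw [dif_neg hx]
      have := ih (x >>> (1 : Nat)) (pvShr1LtOfPos (by omega))
      omega

theorem pvBitLenBound : ∀ y j : Nat, y.testBit j = true → (j : Int) < pvBitLen (y : Int) := by
  intro y
  induction y using Nat.strong_induction_on with
  | _ y ih =>
    intro j hj
    by_cases hy : y = 0
    · subst hy; simp [Nat.zero_testBit] at hj
    · rw [pvBitLen, dif_neg (by omega : ¬ (y : Int) ≤ 0)]
      rw [pvShrCast, Nat.shiftRight_one]
      cases j with
      | zero =>
        have := pvBitLenNonneg ((y / 2 : Nat) : Int); omega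
      | succ s =>
        rw [Nat.testBit_succ] at hj
        have := ih (y / 2) (by omega) s hj
        push_cast at this ⊢; omega

theorem pvBandShrEq (m d : Nat) :
    PySem.Int.band (m : Int) ((m : Int) >>> d) = 0 ↔
      ∀ i : Nat, ¬(m.testBit i = true ∧ m.testBit (d + i) = true) := by
  rw [pvShrCast, PySem.Int.band_natCast]
  rw [Int.natCast_eq_zero]
  constructor
  · intro h i ⟨h1, h2⟩
    have := congrArg (fun z => z.testBit i) h
    simp [Nat.testBit_and, Nat.testBit_shiftRight, h1, h2, Nat.zero_testBit] at this
  · intro h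
    apply Nat.eq_of_testBit_eq
    intro i
    simp only [Nat.testBit_and, Nat.testBit_shiftRight, Nat.zero_testBit,
      Bool.and_eq_false_iff]
    have := h i
    by_cases h1 : m.testBit i = true
    · right; simp only [h1, true_and] at this; simpa using this
    · left; simpa using h1

theorem pvGoodShift (m t : Nat) (k : Int) (h : ∀ i, i < t → m.testBit i = false) :
    pvGood m k ↔ pvGood (m >>> t) k := by
  constructor
  · intro g a b hab ha hb
    rw [Nat.testBit_shiftRight] at ha hb
    have := g (t + a) (t + b) (by omega) ha hb
    push_cast at this ⊢; omega
  · intro g i j hij hi hj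
    have hit : t ≤ i := by
      by_contra hc; rw [h i (by omega)] at hi; exact Bool.false_ne_true hi
    have hjt : t ≤ j := by omega
    have ha : (m >>> t).testBit (i - t) = true := by
      rw [Nat.testBit_shiftRight, Nat.add_sub_cancel' hit]; exact hi
    have hb : (m >>> t).testBit (j - t) = true := by
      rw [Nat.testBit_shiftRight, Nat.add_sub_cancel' hjt]; exact hj
    have := g (i - t) (j - t) (by omega) ha hb
    push_cast at this ⊢; omega

theorem pvGoodOddCons (h : Nat) (hh : 0 < h) (k : Int) :
    pvGood (2 * h + 1) k ↔ ((k : Int) ≤ (pvTz h : Int) ∧ pvGood h k) := by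
  have hb0 : (2 * h + 1).testBit 0 = true := by
    have hm2 : (2 * h + 1) % 2 = 1 := by omega
    simp [Nat.testBit_zero, hm2]
  have hbs : ∀ i, (2 * h + 1).testBit (i + 1) = h.testBit i := by
    intro i; rw [Nat.testBit_succ]
    congr 1; omega
  constructor
  · intro g
    refine ⟨?_, ?_⟩
    · have hset : (2 * h + 1).testBit (pvTz h + 1) = true := by
        rw [hbs]; exact pvTzSet h hh
      have := g 0 (pvTz h + 1) (by omega) hb0 hset
      push_cast at this ⊢; omega
    · intro i j hij hi hj
      have := g (i + 1) (j + 1) (by omega) (by rw [hbs]; exact hi) (by rw [hbs]; exact hj)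
      push_cast at this ⊢; omega
  · intro ⟨hk, g⟩ i j hij hi hj
    cases j with
    | zero => omega
    | succ jj =>
      rw [hbs] at hj
      cases i with
      | zero =>
        have hjt : pvTz h ≤ jj := by
          by_contra hc
          rw [pvTzLow h jj (by omega)] at hj
          exact Bool.false_ne_true hj
        push_cast; omega
      | succ s =>
        rw [hbs] at hi
        have := g s jj (by omega) hi hj
        push_cast at this ⊢; omega

theorem pvBoolEq (a b : Bool) (h : a = true ↔ b = true) : a = b := by
  cases a <;> cases b <;> simp_all

theorem pvGoodOne (k : Int) : pvGood 1 k := by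
  intro i j hij hi hj
  cases j with
  | zero => omega
  | succ s => rw [Nat.testBit_succ] at hj; simp [Nat.zero_testBit] at hj

theorem pvLoopGood (k : Int) : ∀ (fuel : Nat) (m : Nat), m % 2 = 1 → m ≤ fuel →
    (doit_bitmapLoop fuel (m : Int) k = true ↔ pvGood m k) := by
  intro fuel
  induction fuel with
  | zero => intro m hm hf; omega
  | succ f ih =>
    intro m hm hf
    rw [doit_bitmapLoop]
    by_cases h1 : m = 1
    · subst h1
      have h1c : ((1 : Nat) : Int) = 1 := rfl
      rw [h1c, if_pos rfl]
      exact ⟨fun _ => pvGoodOne k, fun _ => rfl⟩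
    · have hm3 : 3 ≤ m := by omega
      have hne : ¬ (m : Int) = 1 := by omega
      rw [if_neg hne]
      have hcast : (m : Int) >>> (1 : Nat) = ((m / 2 : Nat) : Int) := by
        rw [pvShrCast, Nat.shiftRight_one]
      have hpos : 0 < m / 2 := by omega
      rw [hcast, pvStripCountNat (m / 2) hpos 0]
      simp only [zero_add]
      have hrodd := (pvTzShr (m / 2) hpos).1
      have hrle := (pvTzShr (m / 2) hpos).2.2
      have hsplit : pvGood m k ↔ ((k : Int) ≤ (pvTz (m / 2) : Int) ∧ pvGood (m / 2) k) := by
        conv_lhs => rw [show m = 2 * (m / 2) + 1 by omega]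
        exact pvGoodOddCons (m / 2) hpos k
      have hshift : pvGood (m / 2) k ↔ pvGood ((m / 2) >>> pvTz (m / 2)) k :=
        pvGoodShift (m / 2) (pvTz (m / 2)) k (fun i hi => pvTzLow (m / 2) i hi)
      generalize (m / 2) >>> pvTz (m / 2) = r at hrodd hrle hshift ⊢
      have hrf : r ≤ f := by omega
      have hiff := ih r hrodd hrf
      by_cases hck : ((pvTz (m / 2) : Nat) : Int) < k
      · rw [if_pos hck]
        constructor
        · intro hfalse; exact absurd hfalse (by simp)
        · intro hg; exact absurd ((hsplit.mp hg).1) (by omega)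
      · rw [if_neg hck]
        rw [hiff, hsplit, hshift]
        constructor
        · intro hg; exact ⟨by omega, hg⟩
        · intro hg; exact hg.2

theorem pvAllGood (m : Nat) (k : Int) (hm : 0 < m) (hk : 1 ≤ k) :
    ((PySem.List.pyRange 1 (min k (pvBitLen (m : Int)) + 1) 1).all
      (fun j => PySem.Int.band (m : Int) ((m : Int) >>> j.toNat) == 0) = true ↔ pvGood m k) := by
  rw [List.all_eq_true]
  constructor
  · intro H i j hij hi hj
    by_contra hc
    push_neg at hc
    set d : Nat := j - i with hd
    have hd1 : 1 ≤ d := by omega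
    have hdk : (d : Int) ≤ k := by push_cast; omega
    have hjL : (j : Int) < pvBitLen (m : Int) := pvBitLenBound m j hj
    have hmem : (d : Int) ∈ PySem.List.pyRange 1 (min k (pvBitLen (m : Int)) + 1) 1 := by
      rw [PySem.List.mem_pyRange_one]
      constructor
      · push_cast; omega
      · have : (d : Int) ≤ min k (pvBitLen (m : Int)) := by
          apply le_min hdk; push_cast; omega
        omega
    have := H _ hmem
    simp only [beq_iff_eq] at this
    rw [show ((d : Int)).toNat = d by omega] at this
    exact (pvBandShrEq m d).mp this i ⟨hi, by rw [show d + i = j by omega]; exact hj⟩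
  · intro g j hmem
    rw [PySem.List.mem_pyRange_one] at hmem
    simp only [beq_iff_eq]
    rw [pvBandShrEq m j.toNat]
    intro i ⟨h1, h2⟩
    have := g i (j.toNat + i) (by omega) h1 h2
    have hjk : j ≤ min k (pvBitLen (m : Int)) := by omega
    have : (j.toNat : Int) = j := by omega
    omega

-- the loop answers false on a negative bitmap, whatever the fuel
theorem pvStripCountNeg : ∀ n (x : Int), x.natAbs ≤ n → x < 0 → ∀ c : Int,
    (doit_bitmapStripCount x c).2 < 0 ∧ c ≤ (doit_bitmapStripCount x c).1 := by
  intro n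
  induction n with
  | zero => intro x hx hneg c; omega
  | succ n ih =>
    intro x hx hneg c
    have hx0 : x ≠ 0 := by omega
    rw [doit_bitmapStripCount]
    by_cases hb : PySem.Int.band x 1 = 0
    · have he : x % 2 = 0 := by rw [← pvBand1Eq]; exact hb
      have hrec : (x >>> (1 : Nat)).natAbs ≤ n := by
        have := pvShr1LtOfEven hx0 he; omega
      have hp : x >>> (1 : Nat) < 0 := by rw [pvShr1Eq]; omega
      have := ih _ hrec hp (c+1)
      rw [dif_neg hx0, dif_pos hb]
      exact ⟨this.1, by omega⟩
    · rw [dif_neg hx0, dif_neg hb]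
      exact ⟨hneg, le_rfl⟩

theorem pvLoopNegFalse (k : Int) : ∀ (fuel : Nat) (z : Int), z < 0 →
    doit_bitmapLoop fuel z k = false := by
  intro fuel
  induction fuel with
  | zero => intro z _; rfl
  | succ f ih =>
    intro z hz
    rw [doit_bitmapLoop, if_neg (by omega)]
    have hp : z >>> (1 : Nat) < 0 := by rw [pvShr1Eq]; omega
    have hsc := pvStripCountNeg (z >>> (1:Nat)).natAbs _ le_rfl hp 0
    by_cases hck : (doit_bitmapStripCount (z >>> (1:Nat)) 0).1 < k
    · rw [if_pos hck]
    · rw [if_neg hck]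
      exact ih _ hsc.1

theorem pvStripNeg : ∀ n (x : Int), x.natAbs ≤ n → x < 0 → doit_bitmapStrip x < 0 := by
  intro n
  induction n with
  | zero => intro x hx hneg; omega
  | succ n ih =>
    intro x hx hneg
    have hx0 : x ≠ 0 := by omega
    rw [doit_bitmapStrip, dif_neg hx0]
    by_cases hb : PySem.Int.band x 1 = 0
    · have he : x % 2 = 0 := by rw [← pvBand1Eq]; exact hb
      have hlt := pvShr1LtOfEven hx0 he
      have hp : x >>> (1 : Nat) < 0 := by rw [pvShr1Eq]; omega
      rw [dif_pos hb]
      exact ih _ (by omega) hp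
    · rw [dif_neg hb]; exact hneg

-- a list of nonnegative entries accumulates to a nonnegative bitmap
theorem pvFoldNonneg (nums : List Int) (h : ∀ n ∈ nums, 0 ≤ n) :
    ∀ a : Int, 0 ≤ a → 0 ≤ nums.foldl (fun x num => PySem.Int.bor (x <<< (1 : Nat)) num) a := by
  induction nums with
  | nil => intro a ha; simpa using ha
  | cons m t ih =>
    intro a ha
    rw [List.foldl_cons]
    apply ih (fun n hn => h n (List.mem_cons_of_mem _ hn))
    rw [PySem.Int.bor_of_nonneg (by rw [Int.shiftLeft_eq]; positivity) (h m (List.mem_cons_self))]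
    positivity

-- ===== VERDICT (by name: the statement is the Claim_ definition above) =====
theorem doit_bitmap_spec : Claim_equal_doit_bitmap := by
  intro nums k _hdom hpre
  unfold Spec_doit_bitmap
  rw [doit_bitmap, doit_bitmap_alt]
  set x := nums.foldl (fun x num => PySem.Int.bor (x <<< (1 : Nat)) num) 0 with hxdef
  by_cases hx0 : x = 0
  · simp [hx0]
  by_cases hk0 : k = 0
  · simp [hk0]
  rw [if_neg (by tauto)]
  by_cases hxpos : 0 < x
  · set m := x.toNat with hm
    have hxm : x = (m : Int) := by omega
    have hmpos : 0 < m := by omega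
    have hstrip : doit_bitmapStrip x = ((m >>> pvTz m : Nat) : Int) := by
      rw [hxm]; exact pvStripNat m hmpos
    set r := m >>> pvTz m with hr
    have hrfacts := pvTzShr m hmpos
    have hA : doit_bitmapLoop (doit_bitmapStrip x).natAbs (doit_bitmapStrip x) k = true ↔
        pvGood m k := by
      rw [hstrip]
      rw [pvLoopGood k _ r hrfacts.1 (by omega)]
      exact (pvGoodShift m (pvTz m) k (fun i hi => pvTzLow m i hi)).symm
    by_cases hk : k ≤ 0
    · have hkneg : k < 0 := by omega
      rw [if_pos (Or.inl hk)]
      have : pvGood m k := by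
        intro i j hij _ _; push_cast; omega
      rw [hA.mpr this]
    · have hk1 : 1 ≤ k := by omega
      rw [if_neg (by tauto), if_neg (by omega)]
      have hB := pvAllGood m k hmpos hk1
      rw [← hxm] at hB
      exact pvBoolEq _ _ (hA.trans hB.symm)
  · have hxneg : x < 0 := by omega
    have hk : 0 ≤ k := by
      rcases hpre with h | h
      · exact h
      · exact absurd (pvFoldNonneg nums h 0 le_rfl) (by rw [← hxdef]; omega)
    rw [pvLoopNegFalse k _ _ (pvStripNeg x.natAbs x le_rfl hxneg),
        if_neg (by omega), if_pos hxneg]
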